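-- pv_equiv track=rewrite | github.com/dishap22/Codeforces | 800/Educational Codeforces Round 150 (Div 2)- Keep It Beautiful.py | isBeautiful
-- ===== SOURCE A (Python) =====
-- def isBeautiful(arr):
--     if len(arr) == 0 or len(arr) == 1:
--         return True
--
--     gc = 0
--     for i in range(len(arr)-1):
--         if arr[i] > arr[i+1]:
--             gc += 1
--
--     if gc == 1 and arr[-1] > arr[0]:
--         return False
--     elif gc <= 1:
--         return True
--     return False
-- ===== SOURCE B (Python) =====
-- def isBeautiful(arr):
--     n = len(arr)
--     if n <= 1:
--         return True
--     s = sorted(arr)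
--     doubled = s + s
--     return any(arr == doubled[r:r+n] for r in range(n))
-- ===== Notes on version B (the rewrite author's own statement) =====
-- stated objective: alternative
-- what changed: Instead of counting adjacent descents in one scan and branching on the count, B sorts the array and tests whether the array equals some length-n window of sorted+sorted, i.e. whether it is a cyclic rotation of its sorted version.
import Mathlib
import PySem

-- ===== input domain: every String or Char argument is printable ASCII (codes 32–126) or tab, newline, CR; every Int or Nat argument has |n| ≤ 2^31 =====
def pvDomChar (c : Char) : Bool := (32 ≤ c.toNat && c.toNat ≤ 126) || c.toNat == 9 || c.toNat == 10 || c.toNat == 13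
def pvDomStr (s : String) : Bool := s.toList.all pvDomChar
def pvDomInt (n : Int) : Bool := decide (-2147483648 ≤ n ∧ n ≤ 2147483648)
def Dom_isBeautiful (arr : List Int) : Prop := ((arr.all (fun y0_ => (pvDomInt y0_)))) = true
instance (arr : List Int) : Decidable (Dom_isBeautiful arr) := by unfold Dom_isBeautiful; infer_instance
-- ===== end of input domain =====

-- B replaces A's descent-counting scan and branch chain by a different algorithm: sort the
-- array and test whether it equals some length-n window of sorted+sorted, i.e. whether it is
-- a cyclic rotation of its sorted version (objective: alternative; B is not faster).

-- ===== PORT A =====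
def isBeautiful (arr : List Int) : Bool :=
  if arr.length == 0 || arr.length == 1 then true
  else
    -- for i in range(len(arr)-1): if arr[i] > arr[i+1]: gc += 1   (indices always in range here)
    let gc : Int := (PySem.List.pyRange 0 ((arr.length : Int) - 1) 1).foldl
      (fun gc i => if PySem.List.pyGetD arr i 0 > PySem.List.pyGetD arr (i + 1) 0 then gc + 1 else gc) 0
    if gc == 1 && PySem.List.pyGetD arr (-1) 0 > PySem.List.pyGetD arr 0 0 then false
    else if gc ≤ 1 then true
    else false

-- ===== PORT B =====
def isBeautiful_alt (arr : List Int) : Bool :=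
  let n := arr.length
  if n ≤ 1 then true
  else
    let s := PySem.List.sorted arr (fun x => x) false
    let doubled := s ++ s
    -- any(arr == doubled[r:r+n] for r in range(n))
    (PySem.List.pyRange 0 (n : Int) 1).any
      (fun r => arr == PySem.List.slice doubled (some r) (some (r + (n : Int))))

-- ===== PRECONDITION & SPEC =====
def Spec_isBeautiful (arr : List Int) (out : Bool) : Prop := out = isBeautiful_alt arr
instance (arr : List Int) (out : Bool) : Decidable (Spec_isBeautiful arr out) := by unfold Spec_isBeautiful; infer_instance

-- ===== CLAIM (what is proved, stated in full; the proofs are below) =====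
def Claim_equal_isBeautiful : Prop := ∀ (arr : List Int), Dom_isBeautiful arr → Spec_isBeautiful arr (isBeautiful arr)

-- ===== LEMMAS AND PROOFS =====

-- the pair predicate both programs' analyses reduce to
def descP (q : Int × Int) : Bool := decide (q.1 > q.2)

-- number of adjacent (linear) descents
def gcnt (m : List Int) : Nat := (List.zip m m.tail).countP descP

-- number of cyclic descents
def cdesc (m : List Int) : Nat := (List.zip m (m.rotate 1)).countP descP

-- the adjacent pairs A indexes are exactly zip arr arr.tail
lemma range_pairs (arr : List Int) :
    (List.range (arr.length - 1)).map (fun k => (arr.getD k 0, arr.getD (k + 1) 0))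
      = List.zip arr arr.tail := by
  induction arr with
  | nil => simp
  | cons a rest ih =>
    cases rest with
    | nil => simp
    | cons b t =>
      have hl : (a :: b :: t).length - 1 = ((b :: t).length - 1) + 1 := by simp
      rw [hl, List.range_succ_eq_map, List.map_cons, List.map_map]
      have : ((fun k => ((a :: b :: t).getD k 0, (a :: b :: t).getD (k + 1) 0)) ∘ Nat.succ)
          = (fun k => ((b :: t).getD k 0, (b :: t).getD (k + 1) 0)) := by
        funext k; simp [Nat.succ_eq_add_one, List.getD]
      rw [this, ih]
      simp [List.zip]

-- zipping with the rotated-by-one list appends the wrap-around pair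
lemma zip_cyc : ∀ (l : List Int) (z : Int) (h : l ≠ []),
    List.zip l (l.tail ++ [z]) = List.zip l l.tail ++ [(l.getLast h, z)] := by
  intro l
  induction l with
  | nil => intro z h; exact absurd rfl h
  | cons x rest ih =>
    intro z h
    cases rest with
    | nil => simp [List.zip]
    | cons y t =>
      have h2 : (y :: t) ≠ [] := by simp
      have hrec := ih z h2
      simp only [List.tail_cons] at hrec
      simp only [List.zip_cons_cons, List.tail_cons, List.cons_append, hrec]
      simp [List.getLast_cons h2]

-- cdesc splits into the linear descents plus the wrap-around pair
lemma cdesc_eq (m : List Int) (h : m ≠ []) :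
    cdesc m = gcnt m + (if m.getLast h > m.head h then 1 else 0) := by
  obtain ⟨a, t, rfl⟩ := List.exists_cons_of_ne_nil h
  unfold cdesc gcnt
  rw [show (a :: t).rotate 1 = t ++ [a] by simp [List.rotate_cons_succ],
    show (t ++ [a] : List Int) = (a :: t).tail ++ [(a :: t).head h] by simp,
    zip_cyc (a :: t) _ h, List.countP_append]
  simp [descP]

lemma gcnt_cons_cons (a b : Int) (t : List Int) :
    gcnt (a :: b :: t) = gcnt (b :: t) + (if b < a then 1 else 0) := by
  unfold gcnt
  simp only [List.tail_cons, List.zip_cons_cons, List.countP_cons]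
  by_cases hab : b < a <;> simp [descP, hab]

-- gcnt = 0 exactly on nondecreasing lists
lemma gcnt_eq_zero_iff : ∀ (m : List Int), gcnt m = 0 ↔ List.IsChain (· ≤ ·) m := by
  intro m
  induction m with
  | nil => simp [gcnt]
  | cons a t ih =>
    cases t with
    | nil => simp [gcnt]
    | cons b t' =>
      rw [List.isChain_cons_cons, ← ih, gcnt_cons_cons]
      by_cases hab : a ≤ b
      · simp [not_lt.mpr hab, hab]
      · simp [lt_of_not_ge hab, hab]

-- zip commutes with rotation by one on equal-length lists
lemma zip_rotate_one : ∀ (a b : List Int), a.length = b.length →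
    List.zip (a.rotate 1) (b.rotate 1) = (List.zip a b).rotate 1 := by
  intro a b h
  match a, b with
  | [], [] => rfl
  | [], _ :: _ => simp at h
  | _ :: _, [] => simp at h
  | x :: a', y :: b' =>
    have h' : a'.length = b'.length := by simpa using h
    rw [show (x :: a').rotate 1 = a' ++ [x] by simp [List.rotate_cons_succ],
      show (y :: b').rotate 1 = b' ++ [y] by simp [List.rotate_cons_succ],
      List.zip_append h',
      show ((x :: a').zip (y :: b')).rotate 1 = List.zip a' b' ++ [(x, y)] by
        simp [List.zip_cons_cons, List.rotate_cons_succ]]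
    simp [List.zip]

-- the cyclic descent count is invariant under rotation
lemma cdesc_rotate_one (m : List Int) : cdesc (m.rotate 1) = cdesc m := by
  unfold cdesc
  rw [List.rotate_rotate,
    show m.rotate (1 + 1) = (m.rotate 1).rotate 1 by rw [List.rotate_rotate],
    zip_rotate_one m (m.rotate 1) (by simp)]
  exact ((List.zip m (m.rotate 1)).rotate_perm 1).countP_eq descP

lemma cdesc_rotate (m : List Int) : ∀ (r : Nat), cdesc (m.rotate r) = cdesc m := by
  intro r
  induction r with
  | zero => simp
  | succ k ih =>
    rw [show m.rotate (k + 1) = (m.rotate k).rotate 1 by rw [List.rotate_rotate],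
      cdesc_rotate_one, ih]

-- split into the maximal nondecreasing prefix and the rest
def splitAsc : List Int → List Int × List Int
  | [] => ([], [])
  | [a] => ([a], [])
  | a :: b :: t =>
      if a ≤ b then ((a :: (splitAsc (b :: t)).1), (splitAsc (b :: t)).2)
      else ([a], b :: t)

lemma splitAsc_spec : ∀ (l : List Int),
    (splitAsc l).1 ++ (splitAsc l).2 = l ∧
    List.IsChain (· ≤ ·) (splitAsc l).1 ∧
    gcnt l = gcnt (splitAsc l).2 + (if (splitAsc l).2 = [] then 0 else 1) ∧
    (l ≠ [] → (splitAsc l).1 ≠ []) := by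
  intro l
  induction l with
  | nil => simp [splitAsc, gcnt]
  | cons a t ih =>
    cases t with
    | nil => simp [splitAsc, gcnt]
    | cons b t' =>
      obtain ⟨ih1, ih2, ih3, ih4⟩ := ih
      by_cases hab : a ≤ b
      · obtain ⟨x, xs, hp⟩ := List.exists_cons_of_ne_nil (ih4 (by simp))
        have hx : x = b := by
          rw [hp] at ih1
          simpa using congrArg List.head? ih1
        refine ⟨by simp [splitAsc, hab, ih1], ?_, ?_, by simp [splitAsc, hab]⟩
        · simp only [splitAsc, hab, if_pos]
          rw [hp, hx]
          exact List.isChain_cons_cons.mpr ⟨hab, hx ▸ hp ▸ ih2⟩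
        · simp only [splitAsc, hab, if_pos]
          rw [gcnt_cons_cons, if_neg (not_lt.mpr hab), ih3]
          simp
      · refine ⟨by simp [splitAsc, hab], by simp [splitAsc, hab], ?_, by simp [splitAsc, hab]⟩
        simp only [splitAsc, hab, if_false]
        rw [gcnt_cons_cons, if_pos (lt_of_not_ge hab)]
        simp [gcnt]

-- the heart of the equivalence: at most one cyclic descent ↔ a rotation of the sorted version
lemma beautiful_iff_rotation (l : List Int) (hne : l ≠ []) :
    cdesc l ≤ 1 ↔
      ∃ r : Nat, r < l.length ∧ l = (PySem.List.sorted l (fun x => x) false).rotate r := by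
  constructor
  · intro hc
    obtain ⟨hpq, hp, hgc, hpne⟩ := splitAsc_spec l
    have hcd := cdesc_eq l hne
    by_cases hq : (splitAsc l).2 = []
    · have hlp : l = (splitAsc l).1 := by
        conv_lhs => rw [← hpq]
        rw [hq, List.append_nil]
      have hlchain : List.IsChain (· ≤ ·) l := by rw [hlp]; exact hp
      have hs : PySem.List.sorted l (fun x => x) false = l :=
        PySem.List.sorted_id_eq_of_perm_of_pairwise _ _ (List.Perm.refl l)
          (List.isChain_iff_pairwise.mp hlchain)
      exact ⟨0, List.length_pos_of_ne_nil hne, by rw [hs, List.rotate_zero]⟩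
    · rw [if_neg hq] at hgc
      have hw : ¬ l.getLast hne > l.head hne := by
        intro hw; rw [if_pos hw] at hcd; omega
      rw [if_neg hw] at hcd
      have hq0 : gcnt (splitAsc l).2 = 0 := by omega
      have hqchain := (gcnt_eq_zero_iff (splitAsc l).2).mp hq0
      have hchain : List.IsChain (· ≤ ·) ((splitAsc l).2 ++ (splitAsc l).1) := by
        refine List.IsChain.append hqchain hp ?_
        intro x hx y hy
        have hlastq : (splitAsc l).2.getLast? = some (l.getLast hne) := by
          have h1 : ((splitAsc l).1 ++ (splitAsc l).2).getLast? = (splitAsc l).2.getLast? :=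
            List.getLast?_append_of_ne_nil _ hq
          rw [hpq] at h1
          rw [← h1]
          exact List.getLast?_eq_some_getLast hne
        have hheadp : (splitAsc l).1.head? = some (l.head hne) := by
          have h1 : ((splitAsc l).1 ++ (splitAsc l).2).head? = (splitAsc l).1.head? :=
            List.head?_append_of_ne_nil _ (hpne hne)
          rw [hpq] at h1
          rw [← h1]
          exact List.head?_eq_some_head hne
        rw [hlastq] at hx
        rw [hheadp] at hy
        simp at hx hy
        rw [← hx, ← hy]
        exact not_lt.mp hw
      have hperm : ((splitAsc l).2 ++ (splitAsc l).1).Perm l := by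
        conv_rhs => rw [← hpq]
        exact List.perm_append_comm
      have hs : PySem.List.sorted l (fun x => x) false = (splitAsc l).2 ++ (splitAsc l).1 :=
        PySem.List.sorted_id_eq_of_perm_of_pairwise _ _ hperm (List.isChain_iff_pairwise.mp hchain)
      refine ⟨(splitAsc l).2.length, ?_, ?_⟩
      · have hlen : l.length = (splitAsc l).1.length + (splitAsc l).2.length := by
          conv_lhs => rw [← hpq]
          simp
        have hppos : 0 < (splitAsc l).1.length := List.length_pos_of_ne_nil (hpne hne)
        omega
      · rw [hs, List.rotate_eq_drop_append_take (by simp), List.drop_left, List.take_left, hpq]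
  · rintro ⟨r, _, heq⟩
    have hschain : List.IsChain (· ≤ ·) (PySem.List.sorted l (fun x => x) false) := by
      apply List.isChain_iff_pairwise.mpr
      simpa using PySem.List.sorted_pairwise l (fun x => x)
    have hsne : PySem.List.sorted l (fun x => x) false ≠ [] := by
      intro h0
      rw [h0] at heq
      simp at heq
      exact hne heq
    rw [heq, cdesc_rotate _ r, cdesc_eq _ hsne, (gcnt_eq_zero_iff _).mpr hschain]
    split_ifs <;> omega

-- a length-n window of s ++ s is a rotation of s
lemma window_eq_rotate (s : List Int) (k : Nat) (hk : k ≤ s.length) :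
    ((s ++ s).drop k).take s.length = s.rotate k := by
  rw [List.drop_append, Nat.sub_eq_zero_of_le hk, List.drop_zero,
    List.take_append, List.take_of_length_le (by simp),
    List.rotate_eq_drop_append_take hk]
  congr 1
  have : (s.drop k).length = s.length - k := by simp
  rw [this]
  congr 1
  omega

-- A on lists of length ≥ 2 decides "at most one cyclic descent"
lemma A_char (a b : Int) (t : List Int) :
    isBeautiful (a :: b :: t) = decide (cdesc (a :: b :: t) ≤ 1) := by
  set l : List Int := a :: b :: t with hl
  have hne : l ≠ [] := by simp [hl]
  have hlen : l.length = t.length + 2 := by simp [hl]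
  rw [isBeautiful]
  have h0 : (l.length == 0 || l.length == 1) = false := by simp [hlen]
  rw [h0]
  simp only [Bool.false_eq_true, if_false]
  have hcast : (l.length : Int) - 1 = ((l.length - 1 : Nat) : Int) := by
    simp [hlen]; omega
  have hgc : (PySem.List.pyRange 0 ((l.length : Int) - 1) 1).foldl
      (fun gc i => if PySem.List.pyGetD l i 0 > PySem.List.pyGetD l (i + 1) 0 then gc + 1 else gc) 0
        = (gcnt l : Int) := by
    rw [hcast, PySem.List.pyRange_zero_natCast, List.foldl_map]
    have hfun : (fun (x : Int) (k : Nat) =>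
        if PySem.List.pyGetD l (k : Int) 0 > PySem.List.pyGetD l ((k : Int) + 1) 0
        then x + 1 else x)
        = (fun x k => if descP (l.getD k 0, l.getD (k + 1) 0) then x + 1 else x) := by
      funext x k
      have hk : PySem.List.pyGetD l ((k : Int) + 1) 0 = l.getD (k + 1) 0 := by
        rw [show ((k : Int) + 1) = ((k + 1 : Nat) : Int) by push_cast; ring]
        exact PySem.List.pyGetD_natCast l (k + 1) 0
      rw [hk, PySem.List.pyGetD_natCast]
      simp [descP]
    rw [hfun, PySem.List.foldl_count_if]
    unfold gcnt
    rw [← range_pairs l, List.countP_map]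
    simp only [zero_add, Function.comp_def]
  rw [hgc, PySem.List.pyGetD_neg_one l 0 hne]
  have hh : PySem.List.pyGetD l 0 0 = l.head hne := by simp [hl, PySem.List.pyGetD_zero]
  rw [hh]
  rw [cdesc_eq l hne]
  by_cases hw : l.getLast hne > l.head hne <;>
    simp only [hw, decide_true, decide_false, Bool.and_true, Bool.and_false,
      if_false, Bool.false_eq_true, beq_iff_eq, if_pos] <;>
    split_ifs <;>
    first
      | rfl
      | (symm; simp only [decide_eq_true_eq, decide_eq_false_iff_not]; omega)

-- B on lists of length ≥ 2 decides "a rotation of the sorted version"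
lemma B_char (a b : Int) (t : List Int) :
    isBeautiful_alt (a :: b :: t)
      = decide (∃ r : Nat, r < (a :: b :: t).length ∧
          (a :: b :: t) = (PySem.List.sorted (a :: b :: t) (fun x => x) false).rotate r) := by
  set l : List Int := a :: b :: t with hl
  have hlen : l.length = t.length + 2 := by simp [hl]
  have hslen : (PySem.List.sorted l (fun x => x) false).length = l.length :=
    PySem.List.length_sorted l (fun x => x) false
  rw [isBeautiful_alt]
  simp only
  rw [if_neg (by omega)]
  apply Bool.coe_iff_coe.mp
  rw [List.any_eq_true, decide_eq_true_eq]
  constructor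
  · rintro ⟨r, hr, hb⟩
    rw [PySem.List.mem_pyRange_one] at hr
    obtain ⟨hr0, hrn⟩ := hr
    refine ⟨r.toNat, by omega, ?_⟩
    rw [beq_iff_eq] at hb
    rw [show r = (r.toNat : Int) from (Int.toNat_of_nonneg hr0).symm,
      show ((r.toNat : Int) + (l.length : Int)) = ((r.toNat + l.length : Nat) : Int) by push_cast; ring,
      show ((r.toNat + l.length : Nat) : Int) = ((r.toNat : Int) + ((l.length : Nat) : Int)) by push_cast; ring,
      PySem.List.slice_natCast_add] at hb
    rw [← hslen, window_eq_rotate _ _ (by omega)] at hb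
    exact hb
  · rintro ⟨k, hk, heq⟩
    refine ⟨(k : Int), ?_, ?_⟩
    · rw [PySem.List.mem_pyRange_one]
      constructor
      · exact Int.natCast_nonneg k
      · exact_mod_cast hk
    · rw [beq_iff_eq,
        show ((k : Int) + (l.length : Int)) = ((k : Int) + ((l.length : Nat) : Int)) by rfl,
        PySem.List.slice_natCast_add, ← hslen, window_eq_rotate _ _ (by omega)]
      exact heq

theorem isBeautiful_spec' : ∀ (arr : List Int), isBeautiful arr = isBeautiful_alt arr
  | [] => by decide
  | [a] => by simp [isBeautiful, isBeautiful_alt]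
  | a :: b :: t => by
    rw [A_char, B_char, decide_eq_decide]
    exact beautiful_iff_rotation (a :: b :: t) (by simp)

-- ===== VERDICT (by name: the statement is the Claim_ definition above) =====
theorem isBeautiful_spec : Claim_equal_isBeautiful := by
  intro arr _
  exact isBeautiful_spec' arr
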